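-- pv_equiv track=rewrite | github.com/cjvogel1972/advent-of-code | 2025/day10/day.py | push_button_for_lights
-- ===== SOURCE A (Python) =====
-- def push_button_for_lights(lights: str, button_wiring: list[int]) -> str:
--     new_lights = ""
--
--     for i, c in enumerate(lights):
--         if i in button_wiring:
--             if c == ".":
--                 new_lights += "#"
--             else:
--                 new_lights += "."
--         else:
--             new_lights += c
--
--     return new_lights
-- ===== SOURCE B (Python) =====
-- def push_button_for_lights(lights: str, button_wiring: list[int]) -> str:
--     chars = list(lights)
--     for idx in set(button_wiring):
--         if 0 <= idx < len(chars):
--             chars[idx] = "#" if chars[idx] == "." else "."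
--     return "".join(chars)
-- ===== Notes on version B (the rewrite author's own statement) =====
-- stated objective: faster
-- what changed: Instead of scanning every character and testing list membership (O(len*|wiring|)), B mutates a char buffer in place, visiting only the distinct wired indices once each.
import Mathlib
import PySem

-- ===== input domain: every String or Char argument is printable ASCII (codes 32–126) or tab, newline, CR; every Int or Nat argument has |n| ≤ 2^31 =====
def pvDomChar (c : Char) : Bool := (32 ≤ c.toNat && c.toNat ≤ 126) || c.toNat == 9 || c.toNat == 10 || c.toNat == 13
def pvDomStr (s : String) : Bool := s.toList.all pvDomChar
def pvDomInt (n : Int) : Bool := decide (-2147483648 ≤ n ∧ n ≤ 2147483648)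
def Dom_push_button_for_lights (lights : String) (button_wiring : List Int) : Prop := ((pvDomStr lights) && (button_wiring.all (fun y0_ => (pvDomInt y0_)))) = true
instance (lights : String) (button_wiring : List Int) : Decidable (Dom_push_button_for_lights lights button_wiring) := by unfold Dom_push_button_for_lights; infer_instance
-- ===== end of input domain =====

-- B flips only the (distinct) wired in-range indices in a mutable buffer instead of
-- scanning every light and testing membership; equivalence proved on all inputs.

-- ===== PORT A =====
def push_button_for_lights (lights : String) (button_wiring : List Int) : String :=
  (PySem.List.enumerate lights.toList).foldl
    (fun new_lights p =>
      if p.1 ∈ button_wiring then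
        (if p.2 = '.' then new_lights ++ "#" else new_lights ++ ".")
      else new_lights.push p.2) ""

-- ===== PORT B =====
def push_button_for_lights_alt (lights : String) (button_wiring : List Int) : String :=
  String.ofList ((PySem.Set.ofList button_wiring).foldl
    (fun chars idx =>
      if 0 ≤ idx ∧ idx < (chars.length : Int) then
        chars.set idx.toNat (if chars[idx.toNat]! = '.' then '#' else '.')
      else chars) lights.toList)

-- ===== PRECONDITION & SPEC =====
def Spec_push_button_for_lights (lights : String) (button_wiring : List Int) (out : String) : Prop := out = push_button_for_lights_alt lights button_wiring
instance (lights : String) (button_wiring : List Int) (out : String) : Decidable (Spec_push_button_for_lights lights button_wiring out) := by unfold Spec_push_button_for_lights; infer_instance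

-- ===== CLAIM (what is proved, stated in full; the proofs are below) =====
def Claim_equal_push_button_for_lights : Prop := ∀ (lights : String) (button_wiring : List Int), Dom_push_button_for_lights lights button_wiring → Spec_push_button_for_lights lights button_wiring (push_button_for_lights lights button_wiring)

-- ===== LEMMAS AND PROOFS =====

-- the toggle applied to a character at a wired index
def pvToggle (c : Char) : Char := if c = '.' then '#' else '.'

-- B's loop body
def pvStep (chars : List Char) (idx : Int) : List Char :=
  if 0 ≤ idx ∧ idx < (chars.length : Int) then
    chars.set idx.toNat (if chars[idx.toNat]! = '.' then '#' else '.')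
  else chars

theorem pvStep_length (chars : List Char) (idx : Int) : (pvStep chars idx).length = chars.length := by
  unfold pvStep; split <;> simp

theorem pvFold_length (S : List Int) (chars : List Char) :
    (S.foldl pvStep chars).length = chars.length := by
  induction S generalizing chars with
  | nil => rfl
  | cons x xs ih => simp [List.foldl, ih, pvStep_length]

-- characterisation of B's fold: position j ends up toggled iff (j:Int) occurs in the nodup index list
theorem pvFold_getElem (S : List Int) (hS : S.Nodup) (chars : List Char) (j : Nat) (hj : j < chars.length) :
    (S.foldl pvStep chars)[j]? =
      some (if (j : Int) ∈ S then pvToggle (chars[j]'hj) else chars[j]'hj) := by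
  induction S generalizing chars with
  | nil => simp [hj]
  | cons x xs ih =>
    have hnd := List.nodup_cons.mp hS
    have hj' : j < (pvStep chars x).length := by rw [pvStep_length]; exact hj
    rw [List.foldl_cons, ih hnd.2 (pvStep chars x) hj']
    by_cases hx : (j : Int) = x
    · have hxs : (j : Int) ∉ xs := hx ▸ hnd.1
      have hmem : (j : Int) ∈ x :: xs := by simp [hx]
      simp only [if_neg hxs, if_pos hmem]
      have hcond : 0 ≤ x ∧ x < (chars.length : Int) := by
        refine ⟨hx ▸ Int.natCast_nonneg j, ?_⟩
        rw [← hx]; exact_mod_cast hj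
      have hxj : x.toNat = j := by omega
      have key : pvStep chars x = chars.set j (pvToggle (chars[j]'hj)) := by
        unfold pvStep
        rw [if_pos hcond, hxj, getElem!_pos chars j hj]
        rfl
      simp only [key, List.getElem_set_self]
    · have hgs : (pvStep chars x)[j]'hj' = chars[j]'hj := by
        unfold pvStep
        split
        · rename_i h
          rw [List.getElem_set_ne]
          omega
        · rfl
      rw [hgs]
      by_cases hmem : (j : Int) ∈ xs
      · simp [hmem, hx]
      · simp [hmem, hx]

-- characterisation of A's fold over an enumerate suffix, with accumulator generalized
theorem pvA_fold (bw : List Int) (l : List Char) (s : Int) (acc : String) :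
    ((PySem.List.enumerate l s).foldl
      (fun new_lights p =>
        if p.1 ∈ bw then
          (if p.2 = '.' then new_lights ++ "#" else new_lights ++ ".")
        else new_lights.push p.2) acc).toList =
      acc.toList ++ (PySem.List.enumerate l s).map
        (fun p => if p.1 ∈ bw then pvToggle p.2 else p.2) := by
  induction l generalizing s acc with
  | nil => simp [PySem.List.enumerate_nil]
  | cons c cs ih =>
    rw [PySem.List.enumerate_cons]
    simp only [List.foldl_cons, List.map_cons]
    rw [ih]
    by_cases hm : s ∈ bw
    · by_cases hc : c = '.'
      · simp [hm, hc, pvToggle]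
      · simp [hm, hc, pvToggle]
    · simp [hm, pvToggle]

-- ===== VERDICT (by name: the statement is the Claim_ definition above) =====
theorem push_button_for_lights_spec : Claim_equal_push_button_for_lights := by
  intro lights bw _
  unfold Spec_push_button_for_lights push_button_for_lights push_button_for_lights_alt
  have hA := pvA_fold bw lights.toList 0 ""
  apply String.toList_injective
  rw [hA]
  simp only [String.toList_empty, List.nil_append, String.toList_ofList]
  show _ = (PySem.Set.ofList bw).foldl pvStep lights.toList
  apply List.ext_getElem?
  intro j
  by_cases hj : j < lights.toList.length
  · rw [pvFold_getElem _ (PySem.Set.nodup_ofList bw) _ j hj]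
    have h1 : j < (PySem.List.enumerate lights.toList 0).length := by
      simpa [PySem.List.length_enumerate] using hj
    rw [List.getElem?_map, List.getElem?_eq_getElem h1]
    have := PySem.List.getElem_enumerate (xs := lights.toList) (s := 0) (k := j)
      (h := h1)
    rw [this]
    simp [PySem.Set.mem_ofList]
  · rw [List.getElem?_eq_none, List.getElem?_eq_none]
    · rw [pvFold_length]; omega
    · rw [List.length_map, PySem.List.length_enumerate]; omega
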